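-- pv_equiv track=rewrite | github.com/Pritam723/ProblemSolving | 2707-merge-two-2d-arrays-by-summing-values/2707-merge-two-2d-arrays-by-summing-values.py | mergeArrays
-- ===== SOURCE A (Python) =====
-- from typing import List
--
-- def mergeArrays(nums1: List[List[int]], nums2: List[List[int]]) -> List[List[int]]:
--     m = len(nums1)
--     n = len(nums2)
--
--     i = 0
--     j = 0
--
--     ans = []
--
--     while((i < m) and (j < n)):
--         item1 = nums1[i]
--         item2 = nums2[j]
--
--         if(item1[0] == item2[0]):
--             ans.append([item1[0], item1[1] + item2[1]])
--             i += 1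
--             j += 1
--         elif(item1[0] < item2[0]):
--             ans.append([item1[0], item1[1]])
--             i += 1
--         else:
--             ans.append([item2[0], item2[1]])
--             j += 1
--
--     while(i < m):
--         item1 = nums1[i]
--         ans.append([item1[0], item1[1]])
--         i += 1
--
--     while(j < n):
--         item2 = nums2[j]
--         ans.append([item2[0], item2[1]])
--         j += 1
--
--     return ans
-- ===== SOURCE B (Python) =====
-- def mergeArrays(nums1, nums2):
--     out = []
--     i = 0
--     for item2 in nums2:
--         k2 = item2[0]
--         t = i
--         while t < len(nums1) and nums1[t][0] < k2:
--             t += 1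
--         out.extend([x[0], x[1]] for x in nums1[i:t])
--         if t < len(nums1) and nums1[t][0] == k2:
--             out.append([k2, nums1[t][1] + item2[1]])
--             t += 1
--         else:
--             out.append([k2, item2[1]])
--         i = t
--     out.extend([x[0], x[1]] for x in nums1[i:])
--     return out
-- ===== Notes on version B (the rewrite author's own statement) =====
-- stated objective: alternative
-- what changed: Replaces A's symmetric three-branch two-pointer walk (main while loop plus two drain loops) by a nums2-driven run-batching pass: for each nums2 entry an inner scan finds the run of nums1 entries with smaller ids, the run is emitted in one slice-extend, and the boundary (equal id: sum; otherwise: the nums2 entry alone) is resolved, with one final drain of nums1; Pre_ excludes only inner lists with fewer than 2 entries, on which A raises IndexError.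
import Mathlib
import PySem

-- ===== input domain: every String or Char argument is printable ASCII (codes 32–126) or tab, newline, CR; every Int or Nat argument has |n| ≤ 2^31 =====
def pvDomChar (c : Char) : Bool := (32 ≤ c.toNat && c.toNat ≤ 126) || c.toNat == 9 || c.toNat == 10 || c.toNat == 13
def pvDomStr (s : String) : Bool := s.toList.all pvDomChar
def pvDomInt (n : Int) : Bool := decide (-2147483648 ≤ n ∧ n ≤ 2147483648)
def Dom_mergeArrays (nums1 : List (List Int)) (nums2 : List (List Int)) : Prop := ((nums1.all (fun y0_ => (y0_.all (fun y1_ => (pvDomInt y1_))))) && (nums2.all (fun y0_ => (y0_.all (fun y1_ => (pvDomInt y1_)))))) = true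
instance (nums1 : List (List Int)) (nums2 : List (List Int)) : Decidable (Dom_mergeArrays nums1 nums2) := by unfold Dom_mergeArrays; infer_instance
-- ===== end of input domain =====

-- B replaces A's symmetric three-branch two-pointer walk (main while plus two drain loops) by a
-- nums2-driven run-batching pass: for each nums2 entry, batch-emit the run of nums1 entries below
-- its id with an inner scan and a slice, then resolve the boundary; same linear cost (alternative).

-- ===== PORT A =====
-- The while loops over indices i, j only ever inspect the current heads nums1[i], nums2[j], so they
-- are transliterated as the obvious structural recursion over the two remaining suffixes.
-- item[0] / item[1] are exact as getD 0 0 / getD 1 0 on the inner lists of length ≥ 2 admitted by Pre_.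
def mergeA : List (List Int) → List (List Int) → List (List Int)
  | [], ys => ys.map (fun item2 => [item2.getD 0 0, item2.getD 1 0])          -- third while loop
  | xs, [] => xs.map (fun item1 => [item1.getD 0 0, item1.getD 1 0])          -- second while loop
  | item1 :: xs, item2 :: ys =>                                               -- first while loop
    if item1.getD 0 0 = item2.getD 0 0 then
      [item1.getD 0 0, item1.getD 1 0 + item2.getD 1 0] :: mergeA xs ys
    else if item1.getD 0 0 < item2.getD 0 0 then
      [item1.getD 0 0, item1.getD 1 0] :: mergeA xs (item2 :: ys)
    else
      [item2.getD 0 0, item2.getD 1 0] :: mergeA (item1 :: xs) ys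
termination_by xs ys => xs.length + ys.length

def mergeArrays (nums1 : List (List Int)) (nums2 : List (List Int)) : List (List Int) :=
  mergeA nums1 nums2

-- ===== PORT B =====
-- "t = i; while t < len(nums1) and nums1[t][0] < k2: t += 1" — the inner run scan;
-- nums1[t] is exact as getD t [] since the guard keeps t in range
def runScan (nums1 : List (List Int)) (k2 : Int) (t : Nat) : Nat :=
  if h : t < nums1.length ∧ (nums1.getD t []).getD 0 0 < k2 then runScan nums1 k2 (t + 1) else t
termination_by nums1.length - t
decreasing_by omega

-- one iteration of B's "for item2 in nums2" loop over the state (i, out)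
def stepB (nums1 : List (List Int)) (st : Nat × List (List Int)) (item2 : List Int) : Nat × List (List Int) :=
  let k2 := item2.getD 0 0
  let t := runScan nums1 k2 st.1
  let out := st.2 ++ (PySem.List.slice nums1 (some (st.1 : Int)) (some (t : Int))).map
    (fun x => [x.getD 0 0, x.getD 1 0])
  if t < nums1.length ∧ (nums1.getD t []).getD 0 0 = k2 then
    (t + 1, out ++ [[k2, (nums1.getD t []).getD 1 0 + item2.getD 1 0]])
  else
    (t, out ++ [[k2, item2.getD 1 0]])

def mergeArrays_alt (nums1 : List (List Int)) (nums2 : List (List Int)) : List (List Int) :=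
  let st := nums2.foldl (stepB nums1) (0, [])
  st.2 ++ (PySem.List.slice nums1 (some (st.1 : Int)) none).map (fun x => [x.getD 0 0, x.getD 1 0])

-- ===== PRECONDITION & SPEC =====
-- Pre_ excludes exactly the inputs on which A raises: an inner list with fewer than 2 entries
-- makes item[0] or item[1] raise IndexError (every inner list is eventually visited).
def Pre_mergeArrays (nums1 : List (List Int)) (nums2 : List (List Int)) : Prop :=
  (∀ x ∈ nums1, 2 ≤ x.length) ∧ (∀ x ∈ nums2, 2 ≤ x.length)
instance (nums1 : List (List Int)) (nums2 : List (List Int)) : Decidable (Pre_mergeArrays nums1 nums2) := by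
  unfold Pre_mergeArrays; infer_instance

def pvWitness_mergeArrays : List (List Int) × List (List Int) := ([[1, 2], [3, 4]], [[2, 5], [3, 1]])

def Spec_mergeArrays (nums1 : List (List Int)) (nums2 : List (List Int)) (out : List (List Int)) : Prop := out = mergeArrays_alt nums1 nums2
instance (nums1 : List (List Int)) (nums2 : List (List Int)) (out : List (List Int)) : Decidable (Spec_mergeArrays nums1 nums2 out) := by unfold Spec_mergeArrays; infer_instance

-- ===== CLAIM (what is proved, stated in full; the proofs are below) =====
def Claim_equal_mergeArrays : Prop := ∀ (nums1 : List (List Int)) (nums2 : List (List Int)), Dom_mergeArrays nums1 nums2 → Pre_mergeArrays nums1 nums2 → Spec_mergeArrays nums1 nums2 (mergeArrays nums1 nums2)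

-- ===== LEMMAS AND PROOFS =====

lemma mergeA_nil_right (xs : List (List Int)) :
    mergeA xs [] = xs.map (fun item1 => [item1.getD 0 0, item1.getD 1 0]) := by
  cases xs <;> simp [mergeA]

lemma drop_succ_of_lt (l : List (List Int)) (i : Nat) (h : i < l.length) :
    l.drop i = l.getD i [] :: l.drop (i + 1) := by
  rw [List.drop_eq_getElem_cons h]
  congr 1
  rw [List.getD_eq_getElem?_getD, List.getElem?_eq_getElem h]
  rfl

lemma runScan_ge (nums1 : List (List Int)) (k2 : Int) : ∀ t, t ≤ runScan nums1 k2 t := by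
  intro t
  induction t using runScan.induct nums1 k2 with
  | case1 t h ih => rw [runScan, dif_pos h]; omega
  | case2 t h => rw [runScan, dif_neg h]

lemma runScan_step (nums1 : List (List Int)) (k2 : Int) (t : Nat)
    (h : t < nums1.length ∧ (nums1.getD t []).getD 0 0 < k2) :
    runScan nums1 k2 t = runScan nums1 k2 (t + 1) := by
  rw [runScan, dif_pos h]

lemma runScan_stop (nums1 : List (List Int)) (k2 : Int) (t : Nat)
    (h : ¬ (t < nums1.length ∧ (nums1.getD t []).getD 0 0 < k2)) :
    runScan nums1 k2 t = t := by
  rw [runScan, dif_neg h]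

-- A's inner behaviour against one nums2 entry: it emits exactly the run nums1[i:t] (t = runScan),
-- then the boundary entry, and continues
lemma mergeA_run (nums1 : List (List Int)) : ∀ (fuel i : Nat) (item2 : List Int) (l2 : List (List Int)),
    nums1.length - i ≤ fuel →
    mergeA (nums1.drop i) (item2 :: l2)
      = ((nums1.drop i).take (runScan nums1 (item2.getD 0 0) i - i)).map
          (fun x => [x.getD 0 0, x.getD 1 0])
        ++ (if runScan nums1 (item2.getD 0 0) i < nums1.length
              ∧ (nums1.getD (runScan nums1 (item2.getD 0 0) i) []).getD 0 0 = item2.getD 0 0 then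
             [item2.getD 0 0,
               (nums1.getD (runScan nums1 (item2.getD 0 0) i) []).getD 1 0 + item2.getD 1 0]
               :: mergeA (nums1.drop (runScan nums1 (item2.getD 0 0) i + 1)) l2
           else
             [item2.getD 0 0, item2.getD 1 0]
               :: mergeA (nums1.drop (runScan nums1 (item2.getD 0 0) i)) l2) := by
  intro fuel
  induction fuel with
  | zero =>
    intro i item2 l2 hf
    have hi : nums1.length ≤ i := by omega
    rw [runScan_stop nums1 (item2.getD 0 0) i (fun hc => absurd hc.1 (by omega)),
      List.drop_eq_nil_of_le hi,
      if_neg (fun hc => absurd hc.1 (by omega))]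
    simp [mergeA]
  | succ fuel ih =>
    intro i item2 l2 hf
    by_cases hi : i < nums1.length
    · rw [drop_succ_of_lt nums1 i hi]
      simp only [mergeA]
      by_cases he : (nums1.getD i []).getD 0 0 = item2.getD 0 0
      · rw [if_pos he,
          runScan_stop nums1 (item2.getD 0 0) i (fun hc => by rw [he] at hc; exact lt_irrefl _ hc.2),
          if_pos ⟨hi, he⟩]
        simp only [Nat.sub_self, List.take_zero, List.map_nil, List.nil_append]
        rw [he]
      · by_cases hlt : (nums1.getD i []).getD 0 0 < item2.getD 0 0
        · rw [if_neg he, if_pos hlt,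
            runScan_step nums1 (item2.getD 0 0) i ⟨hi, hlt⟩,
            ih (i + 1) item2 l2 (by omega)]
          have hT := runScan_ge nums1 (item2.getD 0 0) (i + 1)
          rw [show runScan nums1 (item2.getD 0 0) (i + 1) - i
              = (runScan nums1 (item2.getD 0 0) (i + 1) - (i + 1)) + 1 from by omega,
            List.take_succ_cons, List.map_cons, List.cons_append]
        · rw [if_neg he, if_neg hlt,
            runScan_stop nums1 (item2.getD 0 0) i (fun hc => hlt hc.2),
            if_neg (fun hc => he hc.2),
            drop_succ_of_lt nums1 i hi]
          simp
    · have hile : nums1.length ≤ i := by omega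
      rw [runScan_stop nums1 (item2.getD 0 0) i (fun hc => absurd hc.1 (by omega)),
        List.drop_eq_nil_of_le hile,
        if_neg (fun hc => absurd hc.1 (by omega))]
      simp [mergeA]

-- the folded loop, with the final drain, is A's merge of the suffixes
lemma foldB_eq (nums1 : List (List Int)) : ∀ (l2 : List (List Int)) (i : Nat) (out : List (List Int)),
    (l2.foldl (stepB nums1) (i, out)).2
      ++ (nums1.drop (l2.foldl (stepB nums1) (i, out)).1).map (fun x => [x.getD 0 0, x.getD 1 0])
    = out ++ mergeA (nums1.drop i) l2 := by
  intro l2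
  induction l2 with
  | nil => intro i out; simp [mergeA_nil_right]
  | cons item2 l2 ih =>
    intro i out
    rw [List.foldl_cons, mergeA_run nums1 (nums1.length - i) i item2 l2 le_rfl]
    by_cases hb : runScan nums1 (item2.getD 0 0) i < nums1.length
        ∧ (nums1.getD (runScan nums1 (item2.getD 0 0) i) []).getD 0 0 = item2.getD 0 0
    · rw [show stepB nums1 (i, out) item2
          = (runScan nums1 (item2.getD 0 0) i + 1,
             out ++ (PySem.List.slice nums1 (some (i : Int))
                 (some ((runScan nums1 (item2.getD 0 0) i : Nat) : Int))).map
               (fun x => [x.getD 0 0, x.getD 1 0])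
               ++ [[item2.getD 0 0,
                 (nums1.getD (runScan nums1 (item2.getD 0 0) i) []).getD 1 0 + item2.getD 1 0]]) from by
        simp only [stepB]; rw [if_pos hb]]
      rw [ih, if_pos hb, PySem.List.slice_natCast]
      simp [List.append_assoc]
    · rw [show stepB nums1 (i, out) item2
          = (runScan nums1 (item2.getD 0 0) i,
             out ++ (PySem.List.slice nums1 (some (i : Int))
                 (some ((runScan nums1 (item2.getD 0 0) i : Nat) : Int))).map
               (fun x => [x.getD 0 0, x.getD 1 0])
               ++ [[item2.getD 0 0, item2.getD 1 0]]) from by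
        simp only [stepB]; rw [if_neg hb]]
      rw [ih, if_neg hb, PySem.List.slice_natCast]
      simp [List.append_assoc]

-- ===== VERDICT (by name: the statement is the Claim_ definition above) =====
theorem mergeArrays_spec : Claim_equal_mergeArrays := by
  intro nums1 nums2 _ _
  unfold Spec_mergeArrays mergeArrays
  show _ = (nums2.foldl (stepB nums1) (0, [])).2
    ++ (PySem.List.slice nums1 (some (((nums2.foldl (stepB nums1) (0, [])).1 : Nat) : Int)) none).map
      (fun x => [x.getD 0 0, x.getD 1 0])
  rw [PySem.List.slice_from _ (by positivity), Int.toNat_natCast]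
  rw [foldB_eq nums1 nums2 0 []]
  simp
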